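-- pv_equiv track=rewrite | github.com/Uaemextop/HuaweiFirmwareTool | tools/fw_rootfs_decompile.py | _classify_strings
-- ===== SOURCE A (Python) =====
-- def _classify_strings(strings: list[str], binary_name: str) -> dict:
--     """Classify strings into categories based on content."""
--     cats: dict = {
--         "commands": [],
--         "paths": [],
--         "messages": [],
--         "functions": [],
--         "config_keys": [],
--         "applets": [],
--     }
--     for s in strings:
--         sl = s.lower()
--         if s.startswith("/") or s.startswith("./"):
--             cats["paths"].append(s)
--         elif s.startswith("HW_") or s.startswith("hw_") or "_CMD_" in s:
--             cats["functions"].append(s)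
--         elif "=" in s and not s.startswith(" ") and len(s) < 80:
--             cats["config_keys"].append(s)
--         elif any(kw in sl for kw in ["error", "fail", "success", "warning",
--                                       "usage", "invalid", "cannot"]):
--             cats["messages"].append(s)
--         elif (binary_name == "busybox" and len(s) < 20
--               and s.isalpha() and s == s.lower()):
--             cats["applets"].append(s)
--         elif any(kw in sl for kw in ["cmd", "cli", "shell", "config",
--                                       "enable", "disable", "show", "set",
--                                       "display", "quit", "exit"]):
--             cats["commands"].append(s)
--     return cats
-- ===== SOURCE B (Python) =====
-- _MSG_KWS = ["error", "fail", "success", "warning", "usage", "invalid", "cannot"]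
-- _CMD_KWS = ["cmd", "cli", "shell", "config", "enable", "disable", "show", "set",
--             "display", "quit", "exit"]
--
--
-- def _partition(pred, xs):
--     """Split xs into (matching, non-matching), preserving order."""
--     yes, no = [], []
--     for x in xs:
--         (yes if pred(x) else no).append(x)
--     return yes, no
--
--
-- def _classify_strings(strings: list[str], binary_name: str) -> dict:
--     # Staged sieve: peel off one category per pass, in priority order, so each
--     # later pass only sees strings no earlier (higher-priority) rule claimed.
--     paths, rest = _partition(lambda s: s.startswith("/") or s.startswith("./"), strings)
--     functions, rest = _partition(
--         lambda s: s.startswith("HW_") or s.startswith("hw_") or "_CMD_" in s, rest)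
--     config_keys, rest = _partition(
--         lambda s: "=" in s and not s.startswith(" ") and len(s) < 80, rest)
--     messages, rest = _partition(
--         lambda s: any(kw in s.lower() for kw in _MSG_KWS), rest)
--     applets, rest = _partition(
--         lambda s: binary_name == "busybox" and len(s) < 20
--         and s.isalpha() and s == s.lower(), rest)
--     commands, _ = _partition(
--         lambda s: any(kw in s.lower() for kw in _CMD_KWS), rest)
--     return {
--         "commands": commands,
--         "paths": paths,
--         "messages": messages,
--         "functions": functions,
--         "config_keys": config_keys,
--         "applets": applets,
--     }
-- ===== Notes on version B (the rewrite author's own statement) =====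
-- stated objective: alternative
-- what changed: Replaces A's single pass with a per-string six-way if/elif chain appending into a mutable dict by a staged sieve: six successive partition passes, each peeling one category off the remainder list in priority order, so no per-string dispatch chain exists.
import Mathlib
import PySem

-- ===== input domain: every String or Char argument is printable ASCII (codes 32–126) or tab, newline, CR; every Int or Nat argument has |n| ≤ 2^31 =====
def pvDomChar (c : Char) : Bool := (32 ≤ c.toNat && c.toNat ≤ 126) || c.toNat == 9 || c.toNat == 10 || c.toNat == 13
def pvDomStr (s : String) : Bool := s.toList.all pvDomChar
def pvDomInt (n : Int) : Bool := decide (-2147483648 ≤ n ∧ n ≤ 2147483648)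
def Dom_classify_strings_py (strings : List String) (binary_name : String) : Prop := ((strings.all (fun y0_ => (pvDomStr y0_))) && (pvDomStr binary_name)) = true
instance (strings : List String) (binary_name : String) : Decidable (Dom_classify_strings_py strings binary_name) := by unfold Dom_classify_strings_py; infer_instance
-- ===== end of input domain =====

-- B replaces A's single pass with a per-string if/elif chain appending into a
-- mutable dict by a staged sieve of six partition passes, one per category in
-- priority order (objective: alternative decomposition, same cost).

-- ===== PORT A =====
-- one body of the Python for-loop: the if/elif chain appending s to one category
def pvStepA (binary_name : String) (cats : PySem.Dict String (List String)) (s : String) : PySem.Dict String (List String) :=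
  let sl := PySem.Str.lower s
  if PySem.Str.startswith s "/" || PySem.Str.startswith s "./" then
    cats.modify "paths" [] (· ++ [s])
  else if PySem.Str.startswith s "HW_" || PySem.Str.startswith s "hw_" || PySem.Str.isIn "_CMD_" s then
    cats.modify "functions" [] (· ++ [s])
  else if PySem.Str.isIn "=" s && !(PySem.Str.startswith s " ") && PySem.Str.len s < 80 then
    cats.modify "config_keys" [] (· ++ [s])
  else if (["error", "fail", "success", "warning", "usage", "invalid", "cannot"].any
      (fun kw => PySem.Str.isIn kw sl)) then
    cats.modify "messages" [] (· ++ [s])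
  else if binary_name == "busybox" && PySem.Str.len s < 20 && PySem.Str.strIsalpha s
      && s == PySem.Str.lower s then
    cats.modify "applets" [] (· ++ [s])
  else if (["cmd", "cli", "shell", "config", "enable", "disable", "show", "set",
           "display", "quit", "exit"].any (fun kw => PySem.Str.isIn kw sl)) then
    cats.modify "commands" [] (· ++ [s])
  else
    cats

def classify_strings_py (strings : List String) (binary_name : String) : List (String × List String) :=
  let cats : PySem.Dict String (List String) :=
    PySem.Dict.ofList [("commands", []), ("paths", []), ("messages", []),
                       ("functions", []), ("config_keys", []), ("applets", [])]
  (strings.foldl (pvStepA binary_name) cats).items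

-- ===== PORT B =====
-- B-side helpers: the six category predicates, one per staged pass
def pvP1 (s : String) : Bool := PySem.Str.startswith s "/" || PySem.Str.startswith s "./"
def pvP2 (s : String) : Bool := PySem.Str.startswith s "HW_" || PySem.Str.startswith s "hw_" || PySem.Str.isIn "_CMD_" s
def pvP3 (s : String) : Bool := PySem.Str.isIn "=" s && !(PySem.Str.startswith s " ") && PySem.Str.len s < 80
def pvP4 (s : String) : Bool :=
  ["error", "fail", "success", "warning", "usage", "invalid", "cannot"].any
    (fun kw => PySem.Str.isIn kw (PySem.Str.lower s))
def pvP5 (binary_name : String) (s : String) : Bool :=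
  binary_name == "busybox" && PySem.Str.len s < 20 && PySem.Str.strIsalpha s && s == PySem.Str.lower s
def pvP6 (s : String) : Bool :=
  ["cmd", "cli", "shell", "config", "enable", "disable", "show", "set",
   "display", "quit", "exit"].any (fun kw => PySem.Str.isIn kw (PySem.Str.lower s))

-- Source B's _partition loop: split into (matching, non-matching), preserving order
def pvPartition (p : String → Bool) : List String → List String × List String
  | [] => ([], [])
  | x :: xs =>
    let r := pvPartition p xs
    if p x then (x :: r.1, r.2) else (r.1, x :: r.2)

def classify_strings_py_alt (strings : List String) (binary_name : String) : List (String × List String) :=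
  let pr := pvPartition pvP1 strings
  let fr := pvPartition pvP2 pr.2
  let kr := pvPartition pvP3 fr.2
  let mr := pvPartition pvP4 kr.2
  let ar := pvPartition (pvP5 binary_name) mr.2
  let cr := pvPartition pvP6 ar.2
  [("commands", cr.1), ("paths", pr.1), ("messages", mr.1),
   ("functions", fr.1), ("config_keys", kr.1), ("applets", ar.1)]

-- ===== PRECONDITION & SPEC =====
def Spec_classify_strings_py (strings : List String) (binary_name : String) (out : List (String × List String)) : Prop := out = classify_strings_py_alt strings binary_name
instance (strings : List String) (binary_name : String) (out : List (String × List String)) : Decidable (Spec_classify_strings_py strings binary_name out) := by unfold Spec_classify_strings_py; infer_instance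

-- ===== CLAIM (what is proved, stated in full; the proofs are below) =====
def Claim_equal_classify_strings_py : Prop := ∀ (strings : List String) (binary_name : String), Dom_classify_strings_py strings binary_name → Spec_classify_strings_py strings binary_name (classify_strings_py strings binary_name)

-- ===== LEMMAS AND PROOFS =====

-- the partition loop computes the two complementary filters
theorem pvPartition_eq (p : String → Bool) (xs : List String) :
    pvPartition p xs = (xs.filter p, xs.filter (fun x => !p x)) := by
  induction xs with
  | nil => rfl
  | cons x t ih =>
    simp only [pvPartition, ih, List.filter_cons]
    cases h : p x <;> simp [h]

-- loop invariant: folding A's step over the six-key dict literal appends, per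
-- key, exactly the strings B's staged sieve leaves for that category
theorem pvStepA_foldl_inv (bn : String) (rest : List String)
    (c p m f k a : List String) :
    (rest.foldl (pvStepA bn)
      (PySem.Dict.mk [("commands", c), ("paths", p), ("messages", m),
                      ("functions", f), ("config_keys", k), ("applets", a)])).items
    = [("commands", c ++ rest.filter (fun s => pvP6 s && (!pvP5 bn s && (!pvP4 s && (!pvP3 s && (!pvP2 s && !pvP1 s)))))),
       ("paths", p ++ rest.filter pvP1),
       ("messages", m ++ rest.filter (fun s => pvP4 s && (!pvP3 s && (!pvP2 s && !pvP1 s)))),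
       ("functions", f ++ rest.filter (fun s => pvP2 s && !pvP1 s)),
       ("config_keys", k ++ rest.filter (fun s => pvP3 s && (!pvP2 s && !pvP1 s))),
       ("applets", a ++ rest.filter (fun s => pvP5 bn s && (!pvP4 s && (!pvP3 s && (!pvP2 s && !pvP1 s)))))] := by
  induction rest generalizing c p m f k a with
  | nil => simp
  | cons s rest ih =>
    simp only [List.foldl_cons]
    cases h1 : (PySem.Str.startswith s "/" || PySem.Str.startswith s "./") with
    | true =>
      have hstep : pvStepA bn (PySem.Dict.mk [("commands", c), ("paths", p), ("messages", m), ("functions", f), ("config_keys", k), ("applets", a)]) s = PySem.Dict.mk [("commands", c), ("paths", p ++ [s]), ("messages", m), ("functions", f), ("config_keys", k), ("applets", a)] := by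
        simp only [pvStepA, h1, reduceIte]
        simp [PySem.Dict.modify, PySem.Dict.insert, PySem.Dict.getD, PySem.Dict.get?, PySem.Dict.contains, List.find?]
      have q1 : pvP1 s = true := h1
      rw [hstep, ih]
      simp [List.filter_cons, q1]
    | false =>
      cases h2 : (PySem.Str.startswith s "HW_" || PySem.Str.startswith s "hw_" || PySem.Str.isIn "_CMD_" s) with
      | true =>
        have hstep : pvStepA bn (PySem.Dict.mk [("commands", c), ("paths", p), ("messages", m), ("functions", f), ("config_keys", k), ("applets", a)]) s = PySem.Dict.mk [("commands", c), ("paths", p), ("messages", m), ("functions", f ++ [s]), ("config_keys", k), ("applets", a)] := by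
          simp only [pvStepA, h1, h2, Bool.false_eq_true, if_false, reduceIte]
          simp [PySem.Dict.modify, PySem.Dict.insert, PySem.Dict.getD, PySem.Dict.get?, PySem.Dict.contains, List.find?]
        have q1 : pvP1 s = false := h1
        have q2 : pvP2 s = true := h2
        rw [hstep, ih]
        simp [List.filter_cons, q1, q2]
      | false =>
        cases h3 : (PySem.Str.isIn "=" s && !(PySem.Str.startswith s " ") && PySem.Str.len s < 80) with
        | true =>
          have hstep : pvStepA bn (PySem.Dict.mk [("commands", c), ("paths", p), ("messages", m), ("functions", f), ("config_keys", k), ("applets", a)]) s = PySem.Dict.mk [("commands", c), ("paths", p), ("messages", m), ("functions", f), ("config_keys", k ++ [s]), ("applets", a)] := by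
            simp only [pvStepA, h1, h2, h3, Bool.false_eq_true, if_false, reduceIte]
            simp [PySem.Dict.modify, PySem.Dict.insert, PySem.Dict.getD, PySem.Dict.get?, PySem.Dict.contains, List.find?]
          have q1 : pvP1 s = false := h1
          have q2 : pvP2 s = false := h2
          have q3 : pvP3 s = true := h3
          rw [hstep, ih]
          simp [List.filter_cons, q1, q2, q3]
        | false =>
          cases h4 : (["error", "fail", "success", "warning", "usage", "invalid", "cannot"].any (fun kw => PySem.Str.isIn kw (PySem.Str.lower s))) with
          | true =>
            have hstep : pvStepA bn (PySem.Dict.mk [("commands", c), ("paths", p), ("messages", m), ("functions", f), ("config_keys", k), ("applets", a)]) s = PySem.Dict.mk [("commands", c), ("paths", p), ("messages", m ++ [s]), ("functions", f), ("config_keys", k), ("applets", a)] := by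
              simp only [pvStepA, h1, h2, h3, h4, Bool.false_eq_true, if_false, reduceIte]
              simp [PySem.Dict.modify, PySem.Dict.insert, PySem.Dict.getD, PySem.Dict.get?, PySem.Dict.contains, List.find?]
            have q1 : pvP1 s = false := h1
            have q2 : pvP2 s = false := h2
            have q3 : pvP3 s = false := h3
            have q4 : pvP4 s = true := h4
            rw [hstep, ih]
            simp [List.filter_cons, q1, q2, q3, q4]
          | false =>
            cases h5 : (bn == "busybox" && PySem.Str.len s < 20 && PySem.Str.strIsalpha s && s == PySem.Str.lower s) with
            | true =>
              have hstep : pvStepA bn (PySem.Dict.mk [("commands", c), ("paths", p), ("messages", m), ("functions", f), ("config_keys", k), ("applets", a)]) s = PySem.Dict.mk [("commands", c), ("paths", p), ("messages", m), ("functions", f), ("config_keys", k), ("applets", a ++ [s])] := by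
                simp only [pvStepA, h1, h2, h3, h4, h5, Bool.false_eq_true, if_false, reduceIte]
                simp [PySem.Dict.modify, PySem.Dict.insert, PySem.Dict.getD, PySem.Dict.get?, PySem.Dict.contains, List.find?]
              have q1 : pvP1 s = false := h1
              have q2 : pvP2 s = false := h2
              have q3 : pvP3 s = false := h3
              have q4 : pvP4 s = false := h4
              have q5 : pvP5 bn s = true := h5
              rw [hstep, ih]
              simp [List.filter_cons, q1, q2, q3, q4, q5]
            | false =>
              cases h6 : (["cmd", "cli", "shell", "config", "enable", "disable", "show", "set", "display", "quit", "exit"].any (fun kw => PySem.Str.isIn kw (PySem.Str.lower s))) with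
              | true =>
                have hstep : pvStepA bn (PySem.Dict.mk [("commands", c), ("paths", p), ("messages", m), ("functions", f), ("config_keys", k), ("applets", a)]) s = PySem.Dict.mk [("commands", c ++ [s]), ("paths", p), ("messages", m), ("functions", f), ("config_keys", k), ("applets", a)] := by
                  simp only [pvStepA, h1, h2, h3, h4, h5, h6, Bool.false_eq_true, if_false, reduceIte]
                  simp [PySem.Dict.modify, PySem.Dict.insert, PySem.Dict.getD, PySem.Dict.get?, PySem.Dict.contains, List.find?]
                have q1 : pvP1 s = false := h1
                have q2 : pvP2 s = false := h2
                have q3 : pvP3 s = false := h3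
                have q4 : pvP4 s = false := h4
                have q5 : pvP5 bn s = false := h5
                have q6 : pvP6 s = true := h6
                rw [hstep, ih]
                simp [List.filter_cons, q1, q2, q3, q4, q5, q6]
              | false =>
                have hstep : pvStepA bn (PySem.Dict.mk [("commands", c), ("paths", p), ("messages", m), ("functions", f), ("config_keys", k), ("applets", a)]) s = PySem.Dict.mk [("commands", c), ("paths", p), ("messages", m), ("functions", f), ("config_keys", k), ("applets", a)] := by
                  simp only [pvStepA, h1, h2, h3, h4, h5, h6, Bool.false_eq_true, if_false, reduceIte]
                have q1 : pvP1 s = false := h1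
                have q2 : pvP2 s = false := h2
                have q3 : pvP3 s = false := h3
                have q4 : pvP4 s = false := h4
                have q5 : pvP5 bn s = false := h5
                have q6 : pvP6 s = false := h6
                rw [hstep, ih]
                simp [List.filter_cons, q1, q2, q3, q4, q5, q6]

-- ===== VERDICT (by name: the statement is the Claim_ definition above) =====
theorem classify_strings_py_spec : Claim_equal_classify_strings_py := by
  intro strings bn _
  unfold Spec_classify_strings_py classify_strings_py classify_strings_py_alt
  rw [show PySem.Dict.ofList [("commands", ([]:List String)), ("paths", []), ("messages", []),
        ("functions", []), ("config_keys", []), ("applets", [])]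
      = PySem.Dict.mk [("commands", []), ("paths", []), ("messages", []),
        ("functions", []), ("config_keys", []), ("applets", [])] by decide]
  rw [pvStepA_foldl_inv]
  simp [pvPartition_eq, List.filter_filter]
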